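-- pv_equiv track=rewrite | github.com/yanhick/conchord | lib/semantic_parser.py | getRangedParts
-- ===== SOURCE A (Python) =====
-- def getRangedParts(parts):
--     length = len(parts)
--     rangedParts = []
--     for idx, (start, name) in enumerate(parts):
--         if idx + 1 < length:
--             (nextStart, nextName)= parts[idx + 1]
--             rangedParts.append((name, (start, nextStart)))
--         else:
--             rangedParts.append((name, (start, start)))
--     return rangedParts
-- ===== SOURCE B (Python) =====
-- def getRangedParts(parts):
--     res = []
--     nextStart = None
--     for start, name in reversed(parts):
--         ns = start if nextStart is None else nextStart
--         res.append((name, (start, ns)))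
--         nextStart = start
--     res.reverse()
--     return res
-- ===== Notes on version B (the rewrite author's own statement) =====
-- stated objective: alternative
-- what changed: Replaces the forward pass with enumerate, length guard and parts[idx+1] look-ahead by a backward scan that threads a running nextStart accumulator and reverses the accumulated list at the end.
import Mathlib
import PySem

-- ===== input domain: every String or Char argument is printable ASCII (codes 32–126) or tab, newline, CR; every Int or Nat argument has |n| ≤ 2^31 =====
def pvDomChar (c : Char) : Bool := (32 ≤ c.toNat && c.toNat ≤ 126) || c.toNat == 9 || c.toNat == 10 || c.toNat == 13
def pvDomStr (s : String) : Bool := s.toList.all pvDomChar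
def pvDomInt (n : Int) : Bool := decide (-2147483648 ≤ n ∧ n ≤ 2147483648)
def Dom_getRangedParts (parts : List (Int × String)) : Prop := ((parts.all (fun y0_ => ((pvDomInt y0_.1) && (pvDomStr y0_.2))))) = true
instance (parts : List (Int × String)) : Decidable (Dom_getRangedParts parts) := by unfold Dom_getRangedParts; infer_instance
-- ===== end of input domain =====

-- B replaces A's forward enumerate pass with its parts[idx+1] look-ahead by a backward scan
-- threading a running nextStart accumulator (objective: alternative decomposition, same cost).

-- ===== PORT A =====
-- Loop 'for idx,(start,name) in enumerate(parts)' = foldl over PySem.List.enumerate; parts[idx+1]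
-- is pyGetD (the default is unreachable: the guard idx+1 < length ensures the index is in range).
def getRangedParts (parts : List (Int × String)) : List (String × (Int × Int)) :=
  let length : Int := parts.length
  (PySem.List.enumerate parts 0).foldl
    (fun rangedParts p =>
      let idx := p.1
      let start := p.2.1
      let name := p.2.2
      if idx + 1 < length then
        let nxt := PySem.List.pyGetD parts (idx + 1) (0, "")
        rangedParts ++ [(name, (start, nxt.1))]
      else
        rangedParts ++ [(name, (start, start))])
    []

-- ===== PORT B =====
-- 'for start, name in reversed(parts)' = foldl over parts.reverse, state (res, nextStart);
-- 'res.reverse()' at the end.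
def getRangedParts_alt (parts : List (Int × String)) : List (String × (Int × Int)) :=
  let st := parts.reverse.foldl
    (fun (st : List (String × (Int × Int)) × Option Int) p =>
      let ns := st.2.getD p.1
      (st.1 ++ [(p.2, (p.1, ns))], some p.1))
    ([], none)
  st.1.reverse

-- ===== PRECONDITION & SPEC =====
def Spec_getRangedParts (parts : List (Int × String)) (out : List (String × (Int × Int))) : Prop := out = getRangedParts_alt parts
instance (parts : List (Int × String)) (out : List (String × (Int × Int))) : Decidable (Spec_getRangedParts parts out) := by unfold Spec_getRangedParts; infer_instance

-- ===== CLAIM (what is proved, stated in full; the proofs are below) =====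
def Claim_equal_getRangedParts : Prop := ∀ (parts : List (Int × String)), Dom_getRangedParts parts → Spec_getRangedParts parts (getRangedParts parts)

-- ===== LEMMAS AND PROOFS =====

-- Reference function: pair each element with the next start (last with its own start).
def pairUp : List (Int × String) → List (String × (Int × Int))
  | [] => []
  | [(s, n)] => [(n, (s, s))]
  | (s, n) :: (s2, n2) :: rest => (n, (s, s2)) :: pairUp ((s2, n2) :: rest)

theorem pairUp_length (parts : List (Int × String)) : (pairUp parts).length = parts.length := by
  induction parts with
  | nil => rfl
  | cons x xs ih =>
    cases xs with
    | nil => rfl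
    | cons y ys => simp [pairUp] at ih ⊢; omega

theorem pairUp_getElem (parts : List (Int × String)) (k : Nat) (h : k < parts.length)
    (h' : k < (pairUp parts).length) :
    (pairUp parts)[k] =
      ((parts[k]).2, ((parts[k]).1,
        if h2 : k + 1 < parts.length then (parts[k + 1]).1 else (parts[k]).1)) := by
  induction parts generalizing k with
  | nil => simp at h
  | cons x xs ih =>
    cases xs with
    | nil =>
      match k with
      | 0 => simp [pairUp]
      | _ + 1 => simp at h
    | cons y ys =>
      cases k with
      | zero => simp [pairUp]
      | succ j =>
        have hj : j < (y :: ys).length := by simpa using h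
        have hj' : j < (pairUp (y :: ys)).length := by
          rw [pairUp_length]; exact hj
        have := ih j hj hj'
        simp only [pairUp, List.getElem_cons_succ]
        rw [this]
        by_cases hc : j + 1 < (y :: ys).length
        · rw [dif_pos hc, dif_pos (by simpa using Nat.succ_lt_succ hc)]
          simp
        · rw [dif_neg hc, dif_neg (by simp at hc ⊢; omega)]

-- A's fold equals pairUp.
theorem portA_eq_pairUp (parts : List (Int × String)) : getRangedParts parts = pairUp parts := by
  unfold getRangedParts
  have hstep : ∀ (acc : List (String × (Int × Int))) (p : Int × (Int × String)),
      (if p.1 + 1 < (parts.length : Int) then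
        acc ++ [(p.2.2, (p.2.1, (PySem.List.pyGetD parts (p.1 + 1) (0, "")).1))]
      else acc ++ [(p.2.2, (p.2.1, p.2.1))]) =
      acc ++ [if p.1 + 1 < (parts.length : Int) then
        (p.2.2, (p.2.1, (PySem.List.pyGetD parts (p.1 + 1) (0, "")).1))
      else (p.2.2, (p.2.1, p.2.1))] := by
    intro acc p; split <;> rfl
  simp only [hstep]
  rw [PySem.List.foldl_append_singleton_eq_map]
  apply List.ext_getElem
  · simp [PySem.List.length_enumerate, pairUp_length]
  · intro k h1 h2
    have hk : k < parts.length := by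
      simpa [PySem.List.length_enumerate] using h1
    simp only [List.nil_append, List.getElem_map, PySem.List.getElem_enumerate]
    rw [pairUp_getElem parts k hk h2]
    simp only [zero_add]
    by_cases hc : k + 1 < parts.length
    · rw [if_pos (by omega), dif_pos hc]
      have : ((k : Int) + 1) = ((k + 1 : Nat) : Int) := by push_cast; ring
      rw [this, PySem.List.pyGetD_natCast]
      simp [List.getD, hc]
    · rw [if_neg (by omega), dif_neg hc]

-- B's fold over the reversed list builds pairUp reversed, with nextStart = first start.
theorem portB_fold (parts : List (Int × String)) :
    parts.reverse.foldl
      (fun (st : List (String × (Int × Int)) × Option Int) p =>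
        (st.1 ++ [(p.2, (p.1, st.2.getD p.1))], some p.1))
      ([], none) = ((pairUp parts).reverse, parts.head?.map (·.1)) := by
  induction parts with
  | nil => rfl
  | cons x xs ih =>
    rw [List.reverse_cons, List.foldl_append, ih]
    cases xs with
    | nil => simp [pairUp]
    | cons y ys => simp [pairUp]

theorem portB_eq_pairUp (parts : List (Int × String)) : getRangedParts_alt parts = pairUp parts := by
  unfold getRangedParts_alt
  simp only [portB_fold, List.reverse_reverse]

-- ===== VERDICT (by name: the statement is the Claim_ definition above) =====
theorem getRangedParts_spec : Claim_equal_getRangedParts := by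
  intro parts _
  unfold Spec_getRangedParts
  rw [portA_eq_pairUp, portB_eq_pairUp]
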